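-- pv_equiv track=rewrite | github.com/WilliamReynoso/tareaRomanos | romanos.py | masDeTresSimbolos
-- ===== SOURCE A (Python) =====
-- def masDeTresSimbolos(str):
--     #checar si un string tiene 3 o mas duplicados consecutivos
--     consecutivos = 0
--     c_ant = ""
--     for c in str:
--         if c_ant == c:
--             consecutivos += 1
--         else:
--             consecutivos = 0
--             c_ant = c
--     return consecutivos > 2
-- ===== SOURCE B (Python) =====
-- def masDeTresSimbolos(str):
--     # B: scan only the trailing run, in reverse, with an early exit.
--     if not str:
--         return False
--     last = str[-1]
--     n = 0
--     for c in reversed(str):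
--         if c == last:
--             n += 1
--         else:
--             break
--     return n > 3
-- ===== Notes on version B (the rewrite author's own statement) =====
-- stated objective: faster
-- what changed: B replaces A's full forward scan with counter/last-char state by a reverse scan of only the trailing run with an early exit on the first mismatch (A's value depends only on the trailing run since c_ant is pinned to the last distinct character).
import Mathlib
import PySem

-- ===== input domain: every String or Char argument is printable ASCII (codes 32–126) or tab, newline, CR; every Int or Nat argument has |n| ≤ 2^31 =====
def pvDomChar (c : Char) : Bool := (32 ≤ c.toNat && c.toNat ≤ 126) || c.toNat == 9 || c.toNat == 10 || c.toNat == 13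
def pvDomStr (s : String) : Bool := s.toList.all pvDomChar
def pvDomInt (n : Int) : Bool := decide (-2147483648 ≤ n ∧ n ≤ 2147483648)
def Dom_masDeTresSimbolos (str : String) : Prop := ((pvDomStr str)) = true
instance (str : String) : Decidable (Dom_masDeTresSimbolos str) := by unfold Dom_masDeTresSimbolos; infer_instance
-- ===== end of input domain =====

-- ===== PORT A =====
-- A: forward fold over the characters with state (consecutivos, c_ant); c_ant is a
-- one-char string (as a List Char) or [] for Python's "".
def masDeTresSimbolos (str : String) : Bool :=
  let st := str.toList.foldl
    (fun (p : Int × List Char) c =>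
      if p.2 == [c] then (p.1 + 1, p.2) else (0, [c]))
    ((0 : Int), ([] : List Char))
  st.1 > 2

-- ===== PORT B =====
-- B helper: count matching characters from the front of the (reversed) list, break on mismatch.
def pvCountRun (last : Char) : List Char → Int
  | [] => 0
  | c :: rest => if c == last then pvCountRun last rest + 1 else 0

def masDeTresSimbolos_alt (str : String) : Bool :=
  match str.toList.reverse with
  | [] => false
  | last :: _ => pvCountRun last str.toList.reverse > 3

-- ===== PRECONDITION & SPEC =====
def Spec_masDeTresSimbolos (str : String) (out : Bool) : Prop := out = masDeTresSimbolos_alt str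
instance (str : String) (out : Bool) : Decidable (Spec_masDeTresSimbolos str out) := by unfold Spec_masDeTresSimbolos; infer_instance

-- ===== CLAIM (what is proved, stated in full; the proofs are below) =====
def Claim_equal_masDeTresSimbolos : Prop := ∀ (str : String), Dom_masDeTresSimbolos str → Spec_masDeTresSimbolos str (masDeTresSimbolos str)

-- ===== LEMMAS AND PROOFS =====
-- A's fold on l ++ [c]: counter = trailing-run length of the whole list minus 1, c_ant = [c].
theorem pvFoldA_concat (l : List Char) (c : Char) :
    List.foldl (fun (p : Int × List Char) c =>
      if p.2 == [c] then (p.1 + 1, p.2) else (0, [c])) ((0 : Int), ([] : List Char)) (l ++ [c])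
    = (pvCountRun c ((l ++ [c]).reverse) - 1, [c]) := by
  induction l using List.reverseRecOn generalizing c with
  | nil => simp [pvCountRun]
  | append_singleton m a ih =>
    rw [List.foldl_append, ih a, List.foldl_cons, List.foldl_nil]
    by_cases h : a = c
    · subst h
      simp [pvCountRun]
    · simp [pvCountRun, h]

-- ===== VERDICT (by name: the statement is the Claim_ definition above) =====
theorem masDeTresSimbolos_spec : Claim_equal_masDeTresSimbolos := by
  intro s _
  unfold Spec_masDeTresSimbolos masDeTresSimbolos masDeTresSimbolos_alt
  rcases hl : s.toList.reverse with _ | ⟨last, rest⟩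
  · have : s.toList = [] := by
      have := congrArg List.reverse hl; simpa using this
    simp [this]
  · have hs : s.toList = rest.reverse ++ [last] := by
      have := congrArg List.reverse hl; simpa using this
    rw [hs, pvFoldA_concat]
    have hrev : (rest.reverse ++ [last]).reverse = last :: rest := by simp
    rw [hrev]
    simp only [decide_eq_decide]
    omega
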